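-- pv_equiv track=rewrite | github.com/yakira666/New_live | exercise/survivors.py | is_defended
-- ===== SOURCE A (Python) =====
-- def is_defended(attackers, defenders):
--     if not attackers:
--         return True
--
--     if not defenders:
--         return False
--
--     survivors_attack = 0  # кол-во выживних у атакующих
--     survivors_defender = 0  # кол-во выживних у обороняющихся
--
--     damage_attack = sum(attackers)  # кол-во силы у атакующих
--     damage_defender = sum(defenders)  # кол-во силы у обороняющихся
--
--     length_attackers = len(attackers)
--     length_defenders = len(defenders)
--
--     if length_attackers > length_defenders:
--         survivors_attack += length_attackers - length_defenders
--     elif length_attackers < length_defenders: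
--         survivors_defender += length_defenders - length_attackers
--
--     arrays = tuple(zip(attackers, defenders))
--
--     for attack, defender in arrays:
--         if attack > defender:
--             survivors_attack += 1
--
--         elif attack < defender:
--             survivors_defender += 1
--
--     if survivors_attack > survivors_defender:
--         return False
--     elif survivors_attack < survivors_defender:
--         return True
--     else:
--         if damage_attack > damage_defender:
--             return False
--         elif damage_attack < damage_defender:
--             return True
--
--         return True
-- ===== SOURCE B (Python) =====
-- def is_defended(attackers, defenders):
--     s = dm = 0
--     it_a = iter(attackers)
--     it_d = iter(defenders)
--     while True:
--         a = next(it_a, None)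
--         d = next(it_d, None)
--         if a is None and d is None:
--             break
--         if d is None:
--             s += 1
--             dm += a
--         elif a is None:
--             s -= 1
--             dm -= d
--         else:
--             s += (a > d) - (a < d)
--             dm += a - d
--     return s < 0 or (s == 0 and dm <= 0)
-- ===== Notes on version B (the rewrite author's own statement) =====
-- stated objective: alternative
-- what changed: Replaces A's staged passes (empty-input guards, two sum() passes, a zip tuple walked with two survivor counters, a three-way final comparison) by one fused merge loop over both iterators that simultaneously maintains a signed survivor balance and a signed damage balance, the iterator-exhaustion branches absorbing the length difference and the guards; the answer is read off the two balances.
import Mathlib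
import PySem

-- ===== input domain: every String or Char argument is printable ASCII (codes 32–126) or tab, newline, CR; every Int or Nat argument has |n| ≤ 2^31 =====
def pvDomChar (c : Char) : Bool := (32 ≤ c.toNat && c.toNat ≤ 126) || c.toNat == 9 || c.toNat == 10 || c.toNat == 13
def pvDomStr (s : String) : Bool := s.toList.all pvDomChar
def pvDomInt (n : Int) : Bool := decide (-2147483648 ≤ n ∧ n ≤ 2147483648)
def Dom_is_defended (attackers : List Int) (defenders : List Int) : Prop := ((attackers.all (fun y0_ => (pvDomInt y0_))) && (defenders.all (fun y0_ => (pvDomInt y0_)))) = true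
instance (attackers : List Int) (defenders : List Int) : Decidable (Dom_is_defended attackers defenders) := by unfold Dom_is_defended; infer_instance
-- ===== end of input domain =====

-- B replaces A's staged passes by one fused merge loop over both sequences, maintaining two signed balances (alternative decomposition, same O(n) cost).

-- ===== PORT A =====
def is_defended (attackers : List Int) (defenders : List Int) : Bool :=
  if attackers = [] then true
  else if defenders = [] then false
  else
    let damage_attack : Int := attackers.sum
    let damage_defender : Int := defenders.sum
    let length_attackers : Int := attackers.length
    let length_defenders : Int := defenders.length
    let init : Int × Int :=
      if length_attackers > length_defenders then (length_attackers - length_defenders, 0)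
      else if length_attackers < length_defenders then (0, length_defenders - length_attackers)
      else (0, 0)
    let p := (attackers.zip defenders).foldl
      (fun (s : Int × Int) ab =>
        if ab.1 > ab.2 then (s.1 + 1, s.2)
        else if ab.1 < ab.2 then (s.1, s.2 + 1)
        else s) init
    if p.1 > p.2 then false
    else if p.1 < p.2 then true
    else if damage_attack > damage_defender then false
    else if damage_attack < damage_defender then true
    else true

-- ===== PORT B =====
-- Source B's while loop over the two iterators, as tail recursion on the unconsumed tails
-- with the two balance accumulators (s, dm)
def pvLoop : List Int → List Int → Int → Int → Int × Int
  | [], [], s, dm => (s, dm)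
  | a :: ra, [], s, dm => pvLoop ra [] (s + 1) (dm + a)
  | [], d :: rd, s, dm => pvLoop [] rd (s - 1) (dm - d)
  | a :: ra, d :: rd, s, dm =>
    pvLoop ra rd (s + ((if a > d then 1 else 0) - (if a < d then 1 else 0))) (dm + a - d)

def is_defended_alt (attackers : List Int) (defenders : List Int) : Bool :=
  let p := pvLoop attackers defenders 0 0
  decide (p.1 < 0 ∨ (p.1 = 0 ∧ p.2 ≤ 0))

-- ===== PRECONDITION & SPEC =====
def Spec_is_defended (attackers : List Int) (defenders : List Int) (out : Bool) : Prop := out = is_defended_alt attackers defenders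
instance (attackers : List Int) (defenders : List Int) (out : Bool) : Decidable (Spec_is_defended attackers defenders out) := by unfold Spec_is_defended; infer_instance

-- ===== CLAIM (what is proved, stated in full; the proofs are below) =====
def Claim_equal_is_defended : Prop := ∀ (attackers : List Int) (defenders : List Int), Dom_is_defended attackers defenders → Spec_is_defended attackers defenders (is_defended attackers defenders)

-- ===== LEMMAS AND PROOFS =====

-- closed characterisation of B's loop
theorem pvLoop_eq (att dfs : List Int) (s dm : Int) :
    pvLoop att dfs s dm =
      (s + (att.length : Int) - dfs.length +
        ((att.zip dfs).map (fun ab => (if ab.1 > ab.2 then (1:Int) else 0) - (if ab.1 < ab.2 then 1 else 0))).sum,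
       dm + att.sum - dfs.sum) := by
  induction att generalizing dfs s dm with
  | nil =>
    induction dfs generalizing s dm with
    | nil => simp [pvLoop]
    | cons d rd ihd =>
      simp only [pvLoop, ihd, List.zip_nil_left, List.map_nil, List.sum_nil,
        List.length_cons, List.length_nil, List.sum_cons, List.sum_nil, Prod.ext_iff]
      constructor <;> push_cast <;> ring
  | cons a ra ih =>
    cases dfs with
    | nil =>
      simp only [pvLoop, ih, List.zip_nil_right, List.map_nil, List.sum_nil,
        List.length_cons, List.length_nil, List.sum_cons, List.sum_nil, Prod.ext_iff]
      constructor <;> push_cast <;> ring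
    | cons d rd =>
      simp only [pvLoop, ih, List.zip_cons_cons, List.map_cons, List.sum_cons,
        List.length_cons, List.sum_cons, Prod.ext_iff]
      constructor <;> push_cast <;> ring

-- A's pair fold, projected to the difference of its components
theorem pv_fold_diff (l : List (Int × Int)) (init : Int × Int) :
    (l.foldl (fun (s : Int × Int) ab =>
        if ab.1 > ab.2 then (s.1 + 1, s.2)
        else if ab.1 < ab.2 then (s.1, s.2 + 1)
        else s) init).1
  - (l.foldl (fun (s : Int × Int) ab =>
        if ab.1 > ab.2 then (s.1 + 1, s.2)
        else if ab.1 < ab.2 then (s.1, s.2 + 1)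
        else s) init).2
  = init.1 - init.2 +
      (l.map (fun ab => (if ab.1 > ab.2 then (1:Int) else 0) - (if ab.1 < ab.2 then 1 else 0))).sum := by
  induction l generalizing init with
  | nil => simp
  | cons ab t ih =>
    simp only [List.foldl_cons, List.map_cons, List.sum_cons]
    rw [ih]
    split_ifs <;> simp <;> omega

-- ===== VERDICT (by name: the statement is the Claim_ definition above) =====
theorem is_defended_spec : Claim_equal_is_defended := by
  intro attackers defenders _
  unfold Spec_is_defended is_defended is_defended_alt
  by_cases ha : attackers = []
  · subst ha
    cases defenders with
    | nil => simp [pvLoop]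
    | cons x t =>
      rw [if_pos rfl]
      simp only [pvLoop_eq]
      symm
      rw [decide_eq_true_eq]
      left
      simp only [List.length_nil, List.length_cons, List.zip_nil_left, List.map_nil,
        List.sum_nil]
      push_cast
      omega
  · by_cases hd : defenders = []
    · subst hd
      cases attackers with
      | nil => exact absurd rfl ha
      | cons x t =>
        rw [if_neg ha, if_pos rfl]
        simp only [pvLoop_eq]
        symm
        rw [decide_eq_false_iff_not]
        simp only [List.length_cons, List.length_nil, List.zip_nil_right, List.map_nil,
          List.sum_nil, not_or, not_lt]
        push_cast
        constructor
        · omega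
        · rintro ⟨h, -⟩
          omega
    · simp only [if_neg ha, if_neg hd]
      set S := ((attackers.zip defenders).map (fun ab => (if ab.1 > ab.2 then (1:Int) else 0) - (if ab.1 < ab.2 then 1 else 0))).sum with hS
      have hb1 : (pvLoop attackers defenders 0 0).1 = (attackers.length : Int) - defenders.length + S := by
        rw [pvLoop_eq]; push_cast; ring
      have hb2 : (pvLoop attackers defenders 0 0).2 = attackers.sum - defenders.sum := by
        rw [pvLoop_eq]; push_cast; ring
      have key := pv_fold_diff (attackers.zip defenders)
        (if ((attackers.length : Int) > (defenders.length : Int)) then ((attackers.length : Int) - (defenders.length : Int), (0:Int))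
         else if ((attackers.length : Int) < (defenders.length : Int)) then (0, (defenders.length : Int) - (attackers.length : Int))
         else (0, 0))
      set p := (attackers.zip defenders).foldl
        (fun (s : Int × Int) ab =>
          if ab.1 > ab.2 then (s.1 + 1, s.2)
          else if ab.1 < ab.2 then (s.1, s.2 + 1)
          else s)
        (if ((attackers.length : Int) > (defenders.length : Int)) then ((attackers.length : Int) - (defenders.length : Int), (0:Int))
         else if ((attackers.length : Int) < (defenders.length : Int)) then (0, (defenders.length : Int) - (attackers.length : Int))
         else (0, 0)) with hp
      have hinit : (if ((attackers.length : Int) > (defenders.length : Int)) then ((attackers.length : Int) - (defenders.length : Int), (0:Int))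
         else if ((attackers.length : Int) < (defenders.length : Int)) then (0, (defenders.length : Int) - (attackers.length : Int))
         else ((0:Int), (0:Int))).1
        - (if ((attackers.length : Int) > (defenders.length : Int)) then ((attackers.length : Int) - (defenders.length : Int), (0:Int))
         else if ((attackers.length : Int) < (defenders.length : Int)) then (0, (defenders.length : Int) - (attackers.length : Int))
         else ((0:Int), (0:Int))).2 = (attackers.length : Int) - defenders.length := by
        split_ifs <;> simp <;> omega
      rw [hinit] at key
      by_cases h1 : p.1 > p.2
      · rw [if_pos h1]
        symm
        rw [decide_eq_false_iff_not, hb1, hb2]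
        omega
      · rw [if_neg h1]
        by_cases h2 : p.1 < p.2
        · rw [if_pos h2]
          symm
          rw [decide_eq_true_eq, hb1, hb2]
          omega
        · rw [if_neg h2]
          split_ifs with h3 h4
          · symm
            rw [decide_eq_false_iff_not, hb1, hb2]
            omega
          · symm
            rw [decide_eq_true_eq, hb1, hb2]
            omega
          · symm
            rw [decide_eq_true_eq, hb1, hb2]
            omega
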